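-- pv_equiv track=rewrite | github.com/khsudha2003/python-automotive-batch9 | Python/aai.py | find_duplicate_first_names
-- ===== SOURCE A (Python) =====
-- def find_duplicate_first_names(student_list):
--     # Dictionary to track which first names we have seen and their surnames
--     seen_first_names = {}
--     found_duplicates = []
--
--     for student in student_list:
--         first = student["first"]
--         last = student["last"]
--
--         if first in seen_first_names:
--             # Check if the surname is different
--             if seen_first_names[first] != last:
--                 # Store both the original and the new one
--                 found_duplicates.append({"first": first, "last": seen_first_names[first]})
--                 found_duplicates.append(student)
--         else:
--             seen_first_names[first] = last
--
--     return found_duplicates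
-- ===== SOURCE B (Python) =====
-- def find_duplicate_first_names(student_list):
--     # Pass 1: record each first name's first-seen surname.
--     first_surname = {}
--     for student in student_list:
--         if student["first"] not in first_surname:
--             first_surname[student["first"]] = student["last"]
--     # Pass 2: emit the original pair + the differing student, in input order.
--     result = []
--     for student in student_list:
--         stored = first_surname[student["first"]]
--         if stored != student["last"]:
--             result.append({"first": student["first"], "last": stored})
--             result.append(student)
--     return result
-- ===== Notes on version B (the rewrite author's own statement) =====
-- stated objective: alternative
-- what changed: Replaces A's single loop with interleaved seen-tracking/emission by two separate passes: one building a first-seen-surname index over the whole list, then a pure scan that emits pairs by comparing each student against the index.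
import Mathlib
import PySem

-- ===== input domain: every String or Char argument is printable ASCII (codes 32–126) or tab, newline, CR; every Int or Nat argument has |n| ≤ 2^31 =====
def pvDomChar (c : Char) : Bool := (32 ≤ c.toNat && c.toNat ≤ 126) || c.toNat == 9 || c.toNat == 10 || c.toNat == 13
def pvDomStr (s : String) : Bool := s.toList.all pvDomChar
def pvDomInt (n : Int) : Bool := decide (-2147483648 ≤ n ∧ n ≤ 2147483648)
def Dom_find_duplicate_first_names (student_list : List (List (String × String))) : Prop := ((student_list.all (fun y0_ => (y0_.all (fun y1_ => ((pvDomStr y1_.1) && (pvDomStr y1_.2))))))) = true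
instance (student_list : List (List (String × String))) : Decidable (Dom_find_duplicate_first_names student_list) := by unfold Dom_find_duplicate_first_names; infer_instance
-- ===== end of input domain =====

-- B replaces A's single interleaved loop by two separate passes (index build, then scan); same O(n) cost.
-- Students (Python dicts) are ported as association lists, normalised via PySem.Dict.ofList; an appended
-- student is emitted as its dict's items, exactly the dict Python appends.

-- ===== PORT A =====
-- A's single loop: threads the seen-dict and the accumulator together.
def pvGoA : PySem.Dict String String → List (List (String × String)) → List (List (String × String)) → List (List (String × String))
  | _, acc, [] => acc
  | seen, acc, s :: rest =>
    let d := PySem.Dict.ofList s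
    let first := d.getD "first" ""
    let last := d.getD "last" ""
    if seen.contains first then
      if seen.getD first "" ≠ last then
        pvGoA seen (acc ++ [[("first", first), ("last", seen.getD first "")], d.items]) rest
      else
        pvGoA seen acc rest
    else
      pvGoA (seen.insert first last) acc rest

def find_duplicate_first_names (student_list : List (List (String × String))) : List (List (String × String)) :=
  pvGoA PySem.Dict.empty [] student_list

-- ===== PORT B =====
-- Pass 1: first-seen surname per first name (insert only when the key is absent).
def pvBuildIdx : PySem.Dict String String → List (List (String × String)) → PySem.Dict String String
  | idx, [] => idx
  | idx, s :: rest =>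
    let d := PySem.Dict.ofList s
    let first := d.getD "first" ""
    pvBuildIdx (if idx.contains first then idx else idx.insert first (d.getD "last" "")) rest

-- Pass 2: pure scan against the finished index.
def pvScanB (idx : PySem.Dict String String) : List (List (String × String)) → List (List (String × String)) → List (List (String × String))
  | acc, [] => acc
  | acc, s :: rest =>
    let d := PySem.Dict.ofList s
    let first := d.getD "first" ""
    let stored := idx.getD first ""
    if stored ≠ d.getD "last" "" then
      pvScanB idx (acc ++ [[("first", first), ("last", stored)], d.items]) rest
    else
      pvScanB idx acc rest

def find_duplicate_first_names_alt (student_list : List (List (String × String))) : List (List (String × String)) :=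
  pvScanB (pvBuildIdx PySem.Dict.empty student_list) [] student_list

-- ===== PRECONDITION & SPEC =====
-- Pre_ excludes exactly the inputs where Python raises KeyError: some student dict lacks "first" or "last".
def Pre_find_duplicate_first_names (student_list : List (List (String × String))) : Prop :=
  ∀ s ∈ student_list, (PySem.Dict.ofList s).contains "first" = true ∧ (PySem.Dict.ofList s).contains "last" = true
instance (student_list : List (List (String × String))) : Decidable (Pre_find_duplicate_first_names student_list) := by unfold Pre_find_duplicate_first_names; infer_instance

def pvWitness_find_duplicate_first_names : (List (List (String × String))) :=
  [[("first", "Ann"), ("last", "Lee")], [("first", "Ann"), ("last", "Ray")]]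

def Spec_find_duplicate_first_names (student_list : List (List (String × String))) (out : List (List (String × String))) : Prop := out = find_duplicate_first_names_alt student_list
instance (student_list : List (List (String × String))) (out : List (List (String × String))) : Decidable (Spec_find_duplicate_first_names student_list out) := by unfold Spec_find_duplicate_first_names; infer_instance

-- ===== CLAIM (what is proved, stated in full; the proofs are below) =====
def Claim_equal_find_duplicate_first_names : Prop := ∀ (student_list : List (List (String × String))), Dom_find_duplicate_first_names student_list → Pre_find_duplicate_first_names student_list → Spec_find_duplicate_first_names student_list (find_duplicate_first_names student_list)

-- ===== LEMMAS AND PROOFS =====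

-- pass 1 never overwrites an existing key
theorem pvBuildIdx_getD_of_contains (rest : List (List (String × String)))
    (idx : PySem.Dict String String) (f : String) (h : idx.contains f = true) :
    (pvBuildIdx idx rest).getD f "" = idx.getD f "" := by
  induction rest generalizing idx with
  | nil => rfl
  | cons s rest ih =>
    simp only [pvBuildIdx]
    by_cases hc : idx.contains ((PySem.Dict.ofList s).getD "first" "") = true
    · rw [if_pos hc]
      exact ih idx h
    · have hne : f ≠ (PySem.Dict.ofList s).getD "first" "" := by
        intro he; rw [he] at h; exact hc h
      rw [if_neg hc]
      rw [ih _ (by rw [PySem.Dict.contains_insert]; simp [h])]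
      exact PySem.Dict.getD_insert_of_ne idx _ _ hne

-- the heart of the equivalence: A's interleaved loop equals B's scan against pass 1's index
theorem pvGoA_eq_pvScanB (rest : List (List (String × String)))
    (seen : PySem.Dict String String) (acc : List (List (String × String))) :
    pvGoA seen acc rest = pvScanB (pvBuildIdx seen rest) acc rest := by
  induction rest generalizing seen acc with
  | nil => rfl
  | cons s rest ih =>
    simp only [pvGoA, pvBuildIdx, pvScanB]
    by_cases hc : seen.contains ((PySem.Dict.ofList s).getD "first" "") = true
    · rw [if_pos hc, if_pos hc]
      have hst : (pvBuildIdx seen rest).getD ((PySem.Dict.ofList s).getD "first" "") ""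
          = seen.getD ((PySem.Dict.ofList s).getD "first" "") "" :=
        pvBuildIdx_getD_of_contains rest seen _ hc
      rw [hst]
      by_cases hne : seen.getD ((PySem.Dict.ofList s).getD "first" "") "" ≠ (PySem.Dict.ofList s).getD "last" ""
      · rw [if_pos hne, if_pos hne]; exact ih _ _
      · rw [if_neg hne, if_neg hne]; exact ih _ _
    · rw [if_neg hc, if_neg hc]
      rw [ih (seen.insert ((PySem.Dict.ofList s).getD "first" "") ((PySem.Dict.ofList s).getD "last" "")) acc]
      have hst : (pvBuildIdx (seen.insert ((PySem.Dict.ofList s).getD "first" "") ((PySem.Dict.ofList s).getD "last" "")) rest).getD ((PySem.Dict.ofList s).getD "first" "") ""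
          = (PySem.Dict.ofList s).getD "last" "" := by
        rw [pvBuildIdx_getD_of_contains rest _ _ (PySem.Dict.contains_insert_self _ _ _),
          PySem.Dict.getD_insert_self]
      rw [hst]
      simp

-- ===== VERDICT (by name: the statement is the Claim_ definition above) =====
theorem find_duplicate_first_names_spec : Claim_equal_find_duplicate_first_names := by
  intro sl _ _
  unfold Spec_find_duplicate_first_names find_duplicate_first_names find_duplicate_first_names_alt
  exact pvGoA_eq_pvScanB sl PySem.Dict.empty []
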